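-- pv_equiv track=rewrite | github.com/wyk18703232953/myResearch | codeComplex/data/filteredData/python/quadratic/python_quadratic_0575.py | givestringsk
-- ===== SOURCE A (Python) =====
-- def givestringsk(k):
--     t = ["R", "G", "B"]
--     ans = []
--     for i in range(3):
--         temp = ""
--         for j in range(i, i + k):
--             temp += t[j % 3]
--         ans.append(temp)
--     return ans
-- ===== SOURCE B (Python) =====
-- def givestringsk(k):
--     t = "RGB"
--     a0 = []
--     a1 = []
--     a2 = []
--     for j in range(k):
--         a0.append(t[j % 3])
--         a1.append(t[(j + 1) % 3])
--         a2.append(t[(j + 2) % 3])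
--     return ["".join(a0), "".join(a1), "".join(a2)]
-- ===== Notes on version B (the rewrite author's own statement) =====
-- stated objective: alternative
-- what changed: B replaces A's three row passes (one per output string, each re-walking range(i,i+k)) by a single column-wise pass over range(k) that appends one character to each of three accumulator lists and joins them at the end.
import Mathlib
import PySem

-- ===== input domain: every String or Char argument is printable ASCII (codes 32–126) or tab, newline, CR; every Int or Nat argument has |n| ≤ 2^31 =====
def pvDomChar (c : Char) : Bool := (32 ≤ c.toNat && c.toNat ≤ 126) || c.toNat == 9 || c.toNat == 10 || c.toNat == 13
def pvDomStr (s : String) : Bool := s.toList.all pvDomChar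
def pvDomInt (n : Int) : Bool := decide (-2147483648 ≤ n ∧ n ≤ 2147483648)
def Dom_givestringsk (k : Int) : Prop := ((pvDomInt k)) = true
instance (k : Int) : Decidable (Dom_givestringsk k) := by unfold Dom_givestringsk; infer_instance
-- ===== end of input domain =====

-- B replaces A's three separate row passes by a single column-wise pass over range(k)
-- feeding three accumulators (objective: alternative decomposition, same cost).

-- ===== PORT A =====
-- Python strings are modelled as List Char (exact on this all-ASCII data); temp += t[j%3]
-- becomes appending the looked-up char-list; String.ofList packs the result back.
def givestringsk (k : Int) : List String :=
  let t : List (List Char) := [['R'], ['G'], ['B']]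
  let ans : List (List Char) :=
    (PySem.List.pyRange 0 3 1).foldl
      (fun ans i =>
        let temp : List Char :=
          (PySem.List.pyRange i (i + k) 1).foldl
            (fun temp j => temp ++ PySem.List.pyGetD t (PySem.Int.mod j 3) []) []
        ans ++ [temp]) []
  ans.map String.ofList

-- ===== PORT B =====
def givestringsk_alt (k : Int) : List String :=
  let t : List Char := "RGB".toList
  let acc :=
    (PySem.List.pyRange 0 k 1).foldl
      (fun (acc : List Char × List Char × List Char) j =>
        (acc.1 ++ [PySem.List.pyGetD t (PySem.Int.mod j 3) 'R'],
         acc.2.1 ++ [PySem.List.pyGetD t (PySem.Int.mod (j + 1) 3) 'R'],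
         acc.2.2 ++ [PySem.List.pyGetD t (PySem.Int.mod (j + 2) 3) 'R']))
      ([], [], [])
  [String.ofList acc.1, String.ofList acc.2.1, String.ofList acc.2.2]

-- ===== PRECONDITION & SPEC =====
def Spec_givestringsk (k : Int) (out : List String) : Prop := out = givestringsk_alt k
instance (k : Int) (out : List String) : Decidable (Spec_givestringsk k out) := by unfold Spec_givestringsk; infer_instance

-- ===== CLAIM (what is proved, stated in full; the proofs are below) =====
def Claim_equal_givestringsk : Prop := ∀ (k : Int), Dom_givestringsk k → Spec_givestringsk k (givestringsk k)

-- ===== LEMMAS AND PROOFS =====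

-- B's triple-accumulator fold splits into three independent map-building folds.
lemma tripleFold_split (l : List Int) (f0 f1 f2 : Int → Char)
    (a0 a1 a2 : List Char) :
    l.foldl (fun (acc : List Char × List Char × List Char) j =>
        (acc.1 ++ [f0 j], acc.2.1 ++ [f1 j], acc.2.2 ++ [f2 j])) (a0, a1, a2)
      = (a0 ++ l.map f0, a1 ++ l.map f1, a2 ++ l.map f2) := by
  induction l generalizing a0 a1 a2 with
  | nil => simp
  | cons x xs ih => simp [ih]

-- list lookup at j % 3 in the char-list table is the singleton of the char-table lookup
lemma lookup_sing (j : Int) :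
    PySem.List.pyGetD [['R'], ['G'], ['B']] (PySem.Int.mod j 3) []
      = [PySem.List.pyGetD ['R', 'G', 'B'] (PySem.Int.mod j 3) 'R'] := by
  have h1 : 0 ≤ PySem.Int.mod j 3 := PySem.Int.mod_nonneg j (by norm_num)
  have h2 : PySem.Int.mod j 3 < 3 := PySem.Int.mod_lt j (by norm_num)
  set m := PySem.Int.mod j 3 with hm
  have : m = 0 ∨ m = 1 ∨ m = 2 := by omega
  rcases this with h | h | h <;> rw [h] <;> rfl

-- A's row i equals a map over range(k) of the shifted char lookup
lemma row_eq (i k : Int) :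
    (PySem.List.pyRange i (i + k) 1).foldl
        (fun temp j => temp ++ PySem.List.pyGetD [['R'], ['G'], ['B']] (PySem.Int.mod j 3) []) []
      = (PySem.List.pyRange 0 k 1).map
          (fun j => PySem.List.pyGetD ['R', 'G', 'B'] (PySem.Int.mod (j + i) 3) 'R') := by
  rw [PySem.List.foldl_append_eq_flatMap, List.nil_append,
      PySem.List.pyRange_one i (i + k), PySem.List.pyRange_one 0 k]
  have hk : i + k - i = k := by ring
  have hk0 : k - 0 = k := by ring
  rw [hk, hk0, List.flatMap_map, List.map_map]
  simp only [Function.comp_def, lookup_sing]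
  generalize List.range k.toNat = l
  induction l with
  | nil => rfl
  | cons n ns ih =>
      simp only [List.flatMap_cons, List.map_cons, List.singleton_append, ih]
      have h : (i + (n : Int)) = (0 + (n : Int) + i) := by omega
      rw [h]

theorem givestringsk_spec : Claim_equal_givestringsk := by
  unfold Claim_equal_givestringsk
  intro k _
  unfold Spec_givestringsk givestringsk givestringsk_alt
  dsimp only
  have h3 : PySem.List.pyRange 0 3 1 = [0, 1, 2] := by decide
  have ht : "RGB".toList = ['R', 'G', 'B'] := rfl
  rw [h3, ht, tripleFold_split]
  simp only [List.foldl_cons, List.foldl_nil, List.nil_append]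
  rw [row_eq 0 k, row_eq 1 k, row_eq 2 k]
  simp [add_zero]
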